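-- pv_equiv track=rewrite | github.com/open-compass/GTA | opencompass/opencompass/datasets/language_quality/language_quality.py | icl_postprocess
-- ===== SOURCE A (Python) =====
-- def icl_postprocess(text: str) -> str:
--     text = text.split('Question:')[0]
--     text = text.split(' ')[::-1]
--     flag = False
--     ret = ''
--     for i in range(len(text)):
--         s = text[i]
--         for i in range(len(s)):
--             if s[i].isdigit():
--                 flag = True
--                 ret = s
--                 break
--         if flag:
--             break
--     ret1 = ''
--     for i in range(len(ret)):
--         if ret[i].isdigit():
--             ret1 += ret[i]
--     return ret1
-- ===== SOURCE B (Python) =====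
-- def icl_postprocess(text: str) -> str:
--     head = text.split('Question:')[0]
--     result = ''
--     cur = ''
--     for ch in head + ' ':
--         if ch == ' ':
--             if cur:
--                 result = cur
--             cur = ''
--         elif ch.isdigit():
--             cur += ch
--     return result
-- ===== Notes on version B (the rewrite author's own statement) =====
-- stated objective: alternative
-- what changed: A builds the word list, reverses it and searches for the first digit-bearing word, then makes a second pass over that word to collect its digits; B never materialises or reverses a word list: it is a single left-to-right character-level state machine over the truncated text that accumulates the current word's digits and commits them at each word boundary, so the last committed buffer is the answer.
import Mathlib
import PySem

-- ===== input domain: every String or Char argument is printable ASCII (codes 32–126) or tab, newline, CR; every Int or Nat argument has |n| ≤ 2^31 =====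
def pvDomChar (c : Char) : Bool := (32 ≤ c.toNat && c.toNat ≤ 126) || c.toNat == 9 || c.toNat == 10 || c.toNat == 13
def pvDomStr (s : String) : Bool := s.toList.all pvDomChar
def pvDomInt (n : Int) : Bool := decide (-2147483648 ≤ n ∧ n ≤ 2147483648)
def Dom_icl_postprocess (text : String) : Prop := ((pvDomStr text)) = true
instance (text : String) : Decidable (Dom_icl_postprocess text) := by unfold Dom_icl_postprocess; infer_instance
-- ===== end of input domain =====

-- B replaces A's word-list build + reverse + first-digit-word search + second digit-extraction pass by a
-- single left-to-right character-level state machine that never materialises a word list (objective: alternative).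

-- ===== PORT A =====
-- inner loop: 'for i in range(len(s)): if s[i].isdigit(): flag = True; ret = s; break'
def pvInnerA : List Char → Bool
  | [] => false
  | c :: cs => if PySem.Chars.isdigit c then true else pvInnerA cs

-- outer loop over the reversed word list, breaking at the first word containing a digit
def pvOuterA : List String → String
  | [] => ""
  | w :: ws => if pvInnerA w.toList then w else pvOuterA ws

-- final loop: 'for i in range(len(ret)): if ret[i].isdigit(): ret1 += ret[i]'
def pvDigitsA : List Char → List Char
  | [] => []
  | c :: cs => if PySem.Chars.isdigit c then c :: pvDigitsA cs else pvDigitsA cs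

def icl_postprocess (text : String) : String :=
  -- text.split('Question:')[0] ; split with a non-empty separator always returns some non-empty list
  let t := ((PySem.Str.split? text "Question:").getD []).headD ""
  -- text.split(' ')[::-1]
  let rev := (PySem.List.slice? ((PySem.Str.split? t " ").getD []) none none (-1)).getD []
  String.ofList (pvDigitsA (pvOuterA rev).toList)

-- ===== PORT B =====
-- one step of Source B's loop body: state = (result, cur), both kept as digit character lists
def pvStepB (st : List Char × List Char) (ch : Char) : List Char × List Char :=
  if ch = ' ' then (if st.2.isEmpty then st.1 else st.2, [])
  else if PySem.Chars.isdigit ch then (st.1, st.2 ++ [ch]) else st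

def icl_postprocess_alt (text : String) : String :=
  -- head = text.split('Question:')[0]
  let head := ((PySem.Str.split? text "Question:").getD []).headD ""
  -- for ch in head + ' ': …  (single pass, state (result, cur))
  String.ofList ((head.toList ++ [' ']).foldl pvStepB ([], [])).1

-- ===== PRECONDITION & SPEC =====
def Spec_icl_postprocess (text : String) (out : String) : Prop := out = icl_postprocess_alt text
instance (text : String) (out : String) : Decidable (Spec_icl_postprocess text out) := by unfold Spec_icl_postprocess; infer_instance

-- ===== CLAIM (what is proved, stated in full; the proofs are below) =====
def Claim_equal_icl_postprocess : Prop := ∀ (text : String), Dom_icl_postprocess text → Spec_icl_postprocess text (icl_postprocess text)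

-- ===== LEMMAS AND PROOFS =====

-- A-side loop characterisations
theorem pvInnerA_eq_any (cs : List Char) : pvInnerA cs = cs.any PySem.Chars.isdigit := by
  induction cs with
  | nil => rfl
  | cons c cs ih => by_cases h : PySem.Chars.isdigit c <;> simp [pvInnerA, h, ih]

theorem pvDigitsA_eq_filter (cs : List Char) : pvDigitsA cs = cs.filter PySem.Chars.isdigit := by
  induction cs with
  | nil => rfl
  | cons c cs ih => by_cases h : PySem.Chars.isdigit c <;> simp [pvDigitsA, h, ih]

theorem pvOuterA_eq_find (ws : List String) :
    pvOuterA ws = ((ws.find? (fun w => w.toList.any PySem.Chars.isdigit)).getD "") := by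
  induction ws with
  | nil => rfl
  | cons w ws ih =>
    by_cases h : w.toList.any PySem.Chars.isdigit <;>
      simp [pvOuterA, pvInnerA_eq_any, List.find?, h, ih]

-- PySem's splitOn on a single-character separator is List.splitOnP on equality with it
theorem pvGoL (s : Char) : ∀ (l : List Char) (fuel : Nat) (cur : List Char) (acc : List (List Char)),
    l.length ≤ fuel →
    PySem.Chars.splitOn.go [s] fuel l cur acc
      = acc.reverse ++ List.modifyHead (cur.reverse ++ ·) (List.splitOnP (· == s) l) := by
  intro l
  induction l with
  | nil =>
    intro fuel cur acc _
    cases fuel <;> simp [PySem.Chars.splitOn.go, List.splitOnP_nil]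
  | cons c rest ih =>
    intro fuel cur acc h
    cases fuel with
    | zero => simp at h
    | succ f =>
      by_cases hc : s = c
      · subst hc
        simp only [PySem.Chars.splitOn.go, List.isPrefixOf, BEq.rfl, Bool.true_and, if_pos]
        simp only [List.length_singleton, List.drop_succ_cons, List.drop_zero]
        rw [ih f [] (cur.reverse :: acc) (by simpa using h)]
        simp [List.splitOnP_cons]
        cases List.splitOnP (fun x => x == s) rest <;> simp
      · have hp : [s].isPrefixOf (c :: rest) = false := by
          simp [List.isPrefixOf]; exact fun h' => absurd h' hc
        simp only [PySem.Chars.splitOn.go, hp, Bool.false_eq_true, if_false]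
        rw [ih f (c :: cur) acc (by simpa using h)]
        have : (c == s) = false := by simp; exact fun h' => absurd h'.symm hc
        simp [List.splitOnP_cons, this]
        cases List.splitOnP (fun x => x == s) rest <;> simp

theorem pvSplitOn_single (s : Char) (cs : List Char) :
    PySem.Chars.splitOn cs [s] = List.splitOnP (· == s) cs := by
  unfold PySem.Chars.splitOn
  rw [pvGoL s cs (cs.length + 1) [] [] (by omega)]
  cases h : List.splitOnP (· == s) cs <;> simp

-- common spec: fold over the word pieces keeping the digits of the last digit-bearing word
def pvH (res : List Char) : List (List Char) → List Char
  | [] => res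
  | w :: ps => pvH (if w.any PySem.Chars.isdigit then w.filter PySem.Chars.isdigit else res) ps

-- first-piece variant: the digits 'cur' already read from the (partial) first word are carried in
def pvH' (res cur : List Char) : List (List Char) → List Char
  | [] => res
  | w :: ps =>
      pvH (if !cur.isEmpty || w.any PySem.Chars.isdigit
           then cur ++ w.filter PySem.Chars.isdigit else res) ps

theorem pvH_eq_find (ps : List (List Char)) : ∀ res,
    pvH res ps = ((ps.reverse.find? (·.any PySem.Chars.isdigit)).map
                    (·.filter PySem.Chars.isdigit)).getD res := by
  induction ps with
  | nil => intro res; rfl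
  | cons w ps ih =>
    intro res
    simp only [pvH, ih, List.reverse_cons, List.find?_append]
    cases hf : ps.reverse.find? (·.any PySem.Chars.isdigit) with
    | some v => simp
    | none =>
      by_cases h : w.any PySem.Chars.isdigit <;> simp [List.find?, h]

-- the character scan computes pvH' over the splitOnP pieces
theorem pvScan_eq (cs : List Char) : ∀ res cur,
    ((cs ++ [' ']).foldl pvStepB (res, cur)).1
      = pvH' res cur (List.splitOnP (· == ' ') cs) := by
  induction cs with
  | nil =>
    intro res cur
    by_cases h : cur.isEmpty <;>
      simp [pvStepB, List.splitOnP_nil, pvH', pvH, h]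
  | cons c cs ih =>
    intro res cur
    by_cases hsp : c = ' '
    · subst hsp
      simp only [List.cons_append, List.foldl_cons, pvStepB, if_pos]
      rw [ih]
      by_cases h : cur.isEmpty <;>
        cases hs : List.splitOnP (· == ' ') cs <;>
          simp_all [List.splitOnP_cons, pvH', pvH]
    · have hb : (c == ' ') = false := by simpa using hsp
      by_cases hd : PySem.Chars.isdigit c
      · simp only [List.cons_append, List.foldl_cons, pvStepB, if_neg hsp, if_pos hd]
        rw [ih]
        cases hs : List.splitOnP (· == ' ') cs <;>
          simp_all [List.splitOnP_cons, pvH']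
      · simp only [List.cons_append, List.foldl_cons, pvStepB, if_neg hsp, if_neg hd]
        rw [ih]
        cases hs : List.splitOnP (· == ' ') cs <;>
          simp_all [List.splitOnP_cons, pvH']

theorem pvH'_nil_nil (ps : List (List Char)) : pvH' [] [] ps = pvH [] ps := by
  cases ps <;> simp [pvH', pvH]

-- the word list A splits out, transported to char lists, is splitOnP on ' '
theorem pvSplit_toList (t : String) :
    ((PySem.Str.split? t " ").getD []).map String.toList
      = List.splitOnP (· == ' ') t.toList := by
  have h := PySem.Str.split?_map t " "
  have h2 : PySem.Chars.split? t.toList " ".toList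
      = some (PySem.Chars.splitOn t.toList [' ']) := by
    rfl
  rw [h2] at h
  cases hs : PySem.Str.split? t " " with
  | none => rw [hs] at h; simp at h
  | some ws =>
    rw [hs] at h
    simp only [Option.map_some, Option.some.injEq] at h
    simpa [pvSplitOn_single] using h

-- ===== VERDICT (by name: the statement is the Claim_ definition above) =====
theorem icl_postprocess_spec : Claim_equal_icl_postprocess := by
  intro text _
  unfold Spec_icl_postprocess icl_postprocess icl_postprocess_alt
  simp only [PySem.List.slice?_none_none_neg_one, Option.getD_some]
  set t := ((PySem.Str.split? text "Question:").getD []).headD "" with ht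
  set ws := (PySem.Str.split? t " ").getD [] with hws
  rw [pvScan_eq, pvH'_nil_nil, pvH_eq_find, ← pvSplit_toList t, ← hws,
    ← List.map_reverse, List.find?_map, pvOuterA_eq_find, pvDigitsA_eq_filter]
  cases hf : ws.reverse.find? (fun w => w.toList.any PySem.Chars.isdigit) with
  | none => simp [hf, Function.comp_def]
  | some w => simp [hf, Function.comp_def]
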